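-- pv_equiv track=rewrite | github.com/guoronghua/python3_practice | aa/zt.py | fun_03
-- ===== SOURCE A (Python) =====
-- def fun_03(n):
--     """
--     一只顽猴想要从山脚爬到山顶
--     途中经过一个有n个台阶的阶梯，但是这个猴子有个习惯，每一次只跳1步或3步
--     试问？猴子通过这个阶梯有多少种不同的跳跃方式
--     """
--     f1 = 1
--     f2 = 1
--     f3 = 2
--     f4 = 1 if n in [1, 2] else 2
--     for x in range(4, n + 1):
--         f4 = f3 + f1
--         f1 = f2
--         f2 = f3
--         f3 = f4
--     return f4
-- ===== SOURCE B (Python) =====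
-- def fun_03(n):
--     """Count jump sequences of 1- and 3-steps summing to n: f(n) = f(n-1) + f(n-3),
--     computed as the (0,0) entry of M**n by binary matrix exponentiation."""
--     if n < 0:
--         return 0
--
--     def mul(X, Y):
--         return tuple(
--             tuple(sum(X[i][k] * Y[k][j] for k in range(3)) for j in range(3))
--             for i in range(3)
--         )
--
--     M = ((1, 0, 1), (1, 0, 0), (0, 1, 0))
--     R = ((1, 0, 0), (0, 1, 0), (0, 0, 1))
--     e = n
--     while e:
--         if e & 1:
--             R = mul(R, M)
--         M = mul(M, M)
--         e >>= 1
--     return R[0][0]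
-- ===== Notes on version B (the rewrite author's own statement) =====
-- stated objective: alternative
-- what changed: Replaces the linear recurrence loop by binary exponentiation of the order-three companion matrix of the jump recurrence, reading the answer off the top-left entry of the matrix power.
-- intended difference: When n is zero, A returns its loop seed of two, whereas B returns one (the single empty jump sequence), which is the intended count for a staircase of zero steps. — e.g. on fun_03(0): A returns 2, B returns 1
-- outside the precondition, e.g. on fun_03(-1): A returns 2, B returns 0
import Mathlib
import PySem

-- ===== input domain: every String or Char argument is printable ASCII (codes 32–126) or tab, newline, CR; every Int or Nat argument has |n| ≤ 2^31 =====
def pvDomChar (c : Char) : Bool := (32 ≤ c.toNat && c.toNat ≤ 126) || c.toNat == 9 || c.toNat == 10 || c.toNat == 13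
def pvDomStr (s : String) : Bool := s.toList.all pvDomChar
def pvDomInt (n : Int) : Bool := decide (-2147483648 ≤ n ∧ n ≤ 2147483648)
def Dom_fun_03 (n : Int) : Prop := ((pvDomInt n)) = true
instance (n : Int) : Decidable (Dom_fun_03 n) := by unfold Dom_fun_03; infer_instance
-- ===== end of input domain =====

-- B replaces A's recurrence loop by binary exponentiation of the 3x3 companion
-- matrix of f(n) = f(n-1) + f(n-3) (objective: alternative algorithm).

-- ===== PORT A =====
-- the body of A's for-loop, updating the state (f1, f2, f3, f4)
def fun_03_step (st : Int × Int × Int × Int) (_x : Int) : Int × Int × Int × Int :=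
  let f4 := st.2.2.1 + st.1
  (st.2.1, st.2.2.1, f4, f4)

def fun_03 (n : Int) : Int :=
  let f1 : Int := 1
  let f2 : Int := 1
  let f3 : Int := 2
  let f4 : Int := if n = 1 ∨ n = 2 then 1 else 2
  let s := (PySem.List.pyRange 4 (n + 1) 1).foldl fun_03_step (f1, f2, f3, f4)
  s.2.2.2

-- ===== PORT B =====
structure Mat3 where
  a : Int
  b : Int
  c : Int
  d : Int
  e : Int
  f : Int
  g : Int
  h : Int
  i : Int
deriving DecidableEq, Repr

-- Source B's mul: 3x3 integer matrix product
def matMul (X Y : Mat3) : Mat3 :=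
  ⟨X.a*Y.a + X.b*Y.d + X.c*Y.g, X.a*Y.b + X.b*Y.e + X.c*Y.h, X.a*Y.c + X.b*Y.f + X.c*Y.i,
   X.d*Y.a + X.e*Y.d + X.f*Y.g, X.d*Y.b + X.e*Y.e + X.f*Y.h, X.d*Y.c + X.e*Y.f + X.f*Y.i,
   X.g*Y.a + X.h*Y.d + X.i*Y.g, X.g*Y.b + X.h*Y.e + X.i*Y.h, X.g*Y.c + X.h*Y.f + X.i*Y.i⟩

-- Source B's while-loop: binary exponentiation, accumulator r, square m, exponent e.
-- fuel only makes the recursion structural; it is exact whenever e ≤ fuel (e halves each turn).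
def powLoop : Nat → Nat → Mat3 → Mat3 → Mat3
  | 0, _, r, _ => r
  | fuel+1, e, r, m =>
      if e = 0 then r
      else powLoop fuel (e / 2) (if e % 2 = 1 then matMul r m else r) (matMul m m)

def fun_03_alt (n : Int) : Int :=
  if n < 0 then 0
  else
    -- here n ≥ 0, so n.toNat is exact for Python's int exponent
    (powLoop n.toNat n.toNat ⟨1,0,0, 0,1,0, 0,0,1⟩ ⟨1,0,1, 1,0,0, 0,1,0⟩).a

-- ===== PRECONDITION & SPEC =====
-- Pre_ restricts to the function's natural domain of nonnegative step counts; on negative n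
-- A still returns its loop seed of two, while B naturally returns zero (no way to climb a negative staircase).
def Pre_fun_03 (n : Int) : Prop := 0 ≤ n
instance (n : Int) : Decidable (Pre_fun_03 n) := by unfold Pre_fun_03; infer_instance
def pvWitness_fun_03 : Int := (5)

-- When n is zero, A returns its loop seed of two, whereas B returns one (the single empty
-- jump sequence), which is the intended count for a staircase of zero steps.
def D_fun_03 (n : Int) : Prop := n = 0
instance (n : Int) : Decidable (D_fun_03 n) := by unfold D_fun_03; infer_instance

def Spec_fun_03 (n : Int) (out : Int) : Prop := ¬ D_fun_03 n → out = fun_03_alt n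
instance (n : Int) (out : Int) : Decidable (Spec_fun_03 n out) := by unfold Spec_fun_03; infer_instance

def pvDiffWitness_fun_03 : Int := (0)
def pvDiffWitnessOut_fun_03 : Int × Int := (2, 1)

-- ===== CLAIM (what is proved, stated in full; the proofs are below) =====
def Claim_unchanged_fun_03 : Prop := ∀ (n : Int), Dom_fun_03 n → Pre_fun_03 n → Spec_fun_03 n (fun_03 n)
def Claim_changed_fun_03 : Prop := Dom_fun_03 (pvDiffWitness_fun_03) ∧ Pre_fun_03 (pvDiffWitness_fun_03) ∧ D_fun_03 (pvDiffWitness_fun_03) ∧ fun_03 (pvDiffWitness_fun_03) = pvDiffWitnessOut_fun_03.1 ∧ fun_03_alt (pvDiffWitness_fun_03) = pvDiffWitnessOut_fun_03.2 ∧ pvDiffWitnessOut_fun_03.1 ≠ pvDiffWitnessOut_fun_03.2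
def Claim_exact_fun_03 : Prop := ∀ (n : Int), Dom_fun_03 n → Pre_fun_03 n → D_fun_03 n → fun_03 n ≠ fun_03_alt n

-- ===== LEMMAS AND PROOFS =====

-- the common mathematical sequence: f 0 = f 1 = f 2 = 1 (with f 3 = 2), f (k+3) = f (k+2) + f k
def fseq : Nat → Int
  | 0 => 1
  | 1 => 1
  | 2 => 1
  | (k+3) => fseq (k+2) + fseq k

theorem fseq_add3 (k : Nat) : fseq (k+3) = fseq (k+2) + fseq k := rfl

-- A's loop invariant
theorem loopA (m : Nat) :
    (PySem.List.pyRange 4 ((m : Int) + 4) 1).foldl fun_03_step ((1:Int), (1:Int), (2:Int), (2:Int))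
      = (fseq (m+1), fseq (m+2), fseq (m+3), fseq (m+3)) := by
  induction m with
  | zero =>
      rw [PySem.List.pyRange_one_eq_nil (by norm_num)]
      simp [fseq]
  | succ m ih =>
      have hsplit : ((m + 1 : Nat) : Int) + 4 = ((m : Int) + 4) + 1 := by push_cast; ring
      rw [hsplit, PySem.List.pyRange_one_succ_right (by omega), List.foldl_append, ih]
      have h4 : fseq (m+4) = fseq (m+3) + fseq (m+1) := fseq_add3 (m+1)
      simp [fun_03_step, h4]

theorem valA (n : Int) (h1 : 1 ≤ n) : fun_03 n = fseq n.toNat := by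
  rcases (show n = 1 ∨ n = 2 ∨ 3 ≤ n by omega) with h | h | h
  · subst h
    simp [fun_03]
    decide
  · subst h
    simp [fun_03]
    decide
  · obtain ⟨m, hm⟩ : ∃ m : Nat, n = (m : Int) + 3 := ⟨(n - 3).toNat, by omega⟩
    subst hm
    have hcond : ¬((m : Int) + 3 = 1 ∨ (m : Int) + 3 = 2) := by omega
    have hrange : (m : Int) + 3 + 1 = (m : Int) + 4 := by ring
    have htonat : ((m : Int) + 3).toNat = m + 3 := by omega
    simp only [fun_03, hcond, if_false, hrange, loopA, htonat]

-- B-side: plain iterated product of the companion matrix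
def mpow (m : Mat3) : Nat → Mat3
  | 0 => ⟨1,0,0, 0,1,0, 0,0,1⟩
  | k+1 => matMul m (mpow m k)

theorem matMul_assoc (X Y Z : Mat3) : matMul (matMul X Y) Z = matMul X (matMul Y Z) := by
  simp only [matMul, Mat3.mk.injEq]
  refine ⟨by ring, by ring, by ring, by ring, by ring, by ring, by ring, by ring, by ring⟩

theorem one_matMul (X : Mat3) : matMul ⟨1,0,0, 0,1,0, 0,0,1⟩ X = X := by
  cases X; simp [matMul]

theorem matMul_one (X : Mat3) : matMul X ⟨1,0,0, 0,1,0, 0,0,1⟩ = X := by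
  cases X; simp [matMul]

theorem mpow_sq (m : Mat3) (k : Nat) : mpow (matMul m m) k = mpow m (2 * k) := by
  induction k with
  | zero => rfl
  | succ k ih =>
      have h2 : 2 * (k + 1) = (2 * k + 1) + 1 := by ring
      rw [h2]
      show matMul (matMul m m) (mpow (matMul m m) k) = matMul m (mpow m (2 * k + 1))
      rw [ih, matMul_assoc]
      rfl

theorem powLoop_eq : ∀ fuel e : Nat, e ≤ fuel → ∀ r m : Mat3, powLoop fuel e r m = matMul r (mpow m e) := by
  intro fuel
  induction fuel with
  | zero =>
      intro e he r m
      have : e = 0 := by omega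
      subst this
      show r = matMul r (mpow m 0)
      rw [show mpow m 0 = ⟨1,0,0, 0,1,0, 0,0,1⟩ from rfl, matMul_one]
  | succ fuel ih =>
      intro e he r m
      by_cases h0 : e = 0
      · subst h0
        show (if (0:Nat) = 0 then r else _) = _
        rw [if_pos rfl, show mpow m 0 = ⟨1,0,0, 0,1,0, 0,0,1⟩ from rfl, matMul_one]
      · show (if e = 0 then r else powLoop fuel (e / 2) (if e % 2 = 1 then matMul r m else r) (matMul m m)) = _
        rw [if_neg h0, ih (e / 2) (by omega), mpow_sq]
        by_cases hodd : e % 2 = 1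
        · have he2 : 2 * (e / 2) + 1 = e := by omega
          rw [if_pos hodd, matMul_assoc,
              show matMul m (mpow m (2 * (e / 2))) = mpow m (2 * (e / 2) + 1) from rfl, he2]
        · have he2 : 2 * (e / 2) = e := by omega
          rw [if_neg hodd, he2]

-- first column of mpow of the companion matrix
def colSeq : Nat → Int × Int × Int
  | 0 => (1, 0, 0)
  | k+1 => ((colSeq k).1 + (colSeq k).2.2, (colSeq k).1, (colSeq k).2.1)

theorem col_mpow (k : Nat) :
    ((mpow ⟨1,0,1, 1,0,0, 0,1,0⟩ k).a, (mpow ⟨1,0,1, 1,0,0, 0,1,0⟩ k).d,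
     (mpow ⟨1,0,1, 1,0,0, 0,1,0⟩ k).g) = colSeq k := by
  induction k with
  | zero => rfl
  | succ k ih =>
      have h1 := congrArg (fun p : Int × Int × Int => p.1) ih
      have h2 := congrArg (fun p : Int × Int × Int => p.2.1) ih
      have h3 := congrArg (fun p : Int × Int × Int => p.2.2) ih
      simp only at h1 h2 h3
      refine Prod.ext ?_ (Prod.ext ?_ ?_) <;>
        simp [mpow, matMul, colSeq, h1, h2, h3]

theorem colSeq_add3 (k : Nat) : colSeq (k+3) = (fseq (k+3), fseq (k+2), fseq (k+1)) := by
  induction k with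
  | zero => decide
  | succ k ih =>
      have h4 : fseq (k+4) = fseq (k+3) + fseq (k+1) := fseq_add3 (k+1)
      show ((colSeq (k+3)).1 + (colSeq (k+3)).2.2, (colSeq (k+3)).1, (colSeq (k+3)).2.1) = _
      rw [ih, h4]

theorem colSeq_fst (k : Nat) : (colSeq k).1 = fseq k := by
  match k with
  | 0 => rfl
  | 1 => rfl
  | 2 => rfl
  | (k+3) => rw [colSeq_add3]

theorem valB (n : Int) (h0 : 0 ≤ n) : fun_03_alt n = fseq n.toNat := by
  rw [fun_03_alt, if_neg (by omega : ¬ n < 0), powLoop_eq n.toNat n.toNat le_rfl, one_matMul]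
  have ha := congrArg (fun p : Int × Int × Int => p.1) (col_mpow n.toNat)
  simp only at ha
  rw [ha, colSeq_fst]

-- ===== VERDICT (by name: the statement is the Claim_ definition above) =====
theorem fun_03_spec : Claim_unchanged_fun_03 := by
  intro n _ hpre hD
  have h1 : 1 ≤ n := by
    unfold Pre_fun_03 at hpre; unfold D_fun_03 at hD; omega
  rw [valA n h1, valB n (by omega)]

theorem fun_03_changed : Claim_changed_fun_03 := by unfold Claim_changed_fun_03; decide

theorem fun_03_tight : Claim_exact_fun_03 := by
  intro n _ _ hD
  unfold D_fun_03 at hD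
  subst hD
  decide
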